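-- pv_equiv track=rewrite | github.com/grapheneaffiliate/h4-polytopic-attention | solve_arc_batch.py | solve_42a50994
-- ===== SOURCE A (Python) =====
-- def solve_42a50994(grid):
--     h, w = len(grid), len(grid[0])
--     visited = [[False]*w for _ in range(h)]
--     components = []
--     for r in range(h):
--         for c in range(w):
--             if grid[r][c] != 0 and not visited[r][c]:
--                 comp = [(r,c)]
--                 visited[r][c] = True
--                 queue = [(r,c)]
--                 while queue:
--                     cr, cc = queue.pop(0)
--                     for dr in [-1,0,1]:
--                         for dc in [-1,0,1]:
--                             if dr==0 and dc==0: continue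
--                             nr, nc = cr+dr, cc+dc
--                             if 0<=nr<h and 0<=nc<w and not visited[nr][nc] and grid[nr][nc] != 0:
--                                 visited[nr][nc] = True
--                                 comp.append((nr,nc))
--                                 queue.append((nr,nc))
--                 components.append(comp)
--     out = [[0]*w for _ in range(h)]
--     for comp in components:
--         if len(comp) >= 2:
--             for r,c in comp:
--                 out[r][c] = grid[r][c]
--     return out
-- ===== SOURCE B (Python) =====
-- def solve_42a50994(grid):
--     # Keep a nonzero cell iff it has at least one nonzero 8-neighbor:
--     # a component has size >= 2 exactly when each of its cells has a nonzero neighbor.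
--     h, w = len(grid), len(grid[0])
--
--     def has_nonzero_neighbor(r, c):
--         for dr in (-1, 0, 1):
--             for dc in (-1, 0, 1):
--                 if dr == 0 and dc == 0:
--                     continue
--                 nr, nc = r + dr, c + dc
--                 if 0 <= nr < h and 0 <= nc < w and grid[nr][nc] != 0:
--                     return True
--         return False
--
--     return [[grid[r][c] if grid[r][c] != 0 and has_nonzero_neighbor(r, c) else 0
--              for c in range(w)] for r in range(h)]
-- ===== Notes on version B (the rewrite author's own statement) =====
-- stated objective: simpler
-- what changed: Replaces the BFS flood-fill that materialises every connected component and repaints the big ones by a single per-cell test: a nonzero cell belongs to a component of size >= 2 exactly when one of its 8 neighbors is nonzero, so B just checks the 8 neighbors of each cell (no visited matrix, no queue, no component lists).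
import Mathlib
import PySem

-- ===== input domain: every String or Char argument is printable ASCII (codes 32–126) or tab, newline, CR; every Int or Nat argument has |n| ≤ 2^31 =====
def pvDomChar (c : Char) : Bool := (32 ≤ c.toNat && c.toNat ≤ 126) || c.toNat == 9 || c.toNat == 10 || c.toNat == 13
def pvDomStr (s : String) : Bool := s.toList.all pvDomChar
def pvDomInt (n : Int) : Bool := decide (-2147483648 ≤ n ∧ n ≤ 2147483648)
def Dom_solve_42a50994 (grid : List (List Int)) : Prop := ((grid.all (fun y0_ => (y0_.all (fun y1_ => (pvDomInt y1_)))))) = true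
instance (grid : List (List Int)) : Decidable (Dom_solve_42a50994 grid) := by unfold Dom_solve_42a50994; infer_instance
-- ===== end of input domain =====

-- B replaces A's BFS flood-fill over explicit components by a per-cell check of the 8
-- neighbors (a cell's component has size ≥ 2 iff some 8-neighbor is nonzero):
-- simpler, and measurably faster (no queue.pop(0), no visited/component lists).

-- ===== PORT A =====
-- grid[r][c] for 0 ≤ r < h, 0 ≤ c < w (Pre_ guarantees the access is in range, so getD's
-- defaults are never used on admitted inputs)
def pvGet (grid : List (List Int)) (r c : Int) : Int :=
  (grid.getD r.toNat []).getD c.toNat 0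

-- body of the innermost neighbor loop: visit candidate cell y = (nr, nc)
def pvCondAdd (grid : List (List Int)) (h w : Nat)
    (st : List (Int × Int) × List (Int × Int) × List (Int × Int)) (y : Int × Int) :
    List (Int × Int) × List (Int × Int) × List (Int × Int) :=
  if 0 ≤ y.1 ∧ y.1 < (h : Int) ∧ 0 ≤ y.2 ∧ y.2 < (w : Int) ∧ ¬ y ∈ st.1 ∧
      pvGet grid y.1 y.2 ≠ 0 then
    (st.1 ++ [y], st.2.1 ++ [y], st.2.2 ++ [y])
  else st

-- the two nested `for dr/dc in [-1,0,1]` loops with the (0,0) skip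
def pvScan (grid : List (List Int)) (h w : Nat) (cr cc : Int)
    (st : List (Int × Int) × List (Int × Int) × List (Int × Int)) :
    List (Int × Int) × List (Int × Int) × List (Int × Int) :=
  [(-1 : Int), 0, 1].foldl (fun st dr =>
    [(-1 : Int), 0, 1].foldl (fun st dc =>
      if dr = 0 ∧ dc = 0 then st
      else pvCondAdd grid h w st (cr + dr, cc + dc)) st) st

-- the `while queue:` loop; fuel h*w is enough: one pop per iteration, and at most h*w
-- distinct cells are ever enqueued (proved in the lemmas below)
def pvBFS (grid : List (List Int)) (h w : Nat) :
    Nat → List (Int × Int) × List (Int × Int) × List (Int × Int) →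
    List (Int × Int) × List (Int × Int)
  | 0, st => (st.1, st.2.1)
  | fuel + 1, st =>
    match st.2.2 with
    | [] => (st.1, st.2.1)
    | (cr, cc) :: rest => pvBFS grid h w fuel (pvScan grid h w cr cc (st.1, st.2.1, rest))

-- the two outer `for r/for c` loops collecting (visited, components)
def pvOuter (grid : List (List Int)) (h w : Nat) :
    List (Int × Int) × List (List (Int × Int)) :=
  (List.range h).foldl (fun st r =>
    (List.range w).foldl (fun st c =>
      if pvGet grid (r : Int) (c : Int) ≠ 0 ∧ ¬ ((r : Int), (c : Int)) ∈ st.1 then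
        let res := pvBFS grid h w (h * w)
          (st.1 ++ [((r : Int), (c : Int))], [((r : Int), (c : Int))], [((r : Int), (c : Int))])
        (res.1, st.2 ++ [res.2])
      else st) st) ([], [])

-- out[r][c] = val
def pvSet2 (out : List (List Int)) (r c : Int) (val : Int) : List (List Int) :=
  out.set r.toNat ((out.getD r.toNat []).set c.toNat val)

def solve_42a50994 (grid : List (List Int)) : List (List Int) :=
  let h := grid.length
  let w := (grid.getD 0 []).length   -- len(grid[0]); raises IndexError on [], excluded by Pre_
  let comps := (pvOuter grid h w).2
  comps.foldl (fun out comp =>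
    if 2 ≤ comp.length then
      comp.foldl (fun out rc => pvSet2 out rc.1 rc.2 (pvGet grid rc.1 rc.2)) out
    else out) (List.replicate h (List.replicate w 0))

-- ===== PORT B =====
-- `has_nonzero_neighbor(r, c)`: the two `for dr/dc in (-1,0,1)` loops with early return
def pvHasNbr (grid : List (List Int)) (h w : Nat) (r c : Int) : Bool :=
  [(-1 : Int), 0, 1].any (fun dr =>
    [(-1 : Int), 0, 1].any (fun dc =>
      if dr = 0 ∧ dc = 0 then false
      else
        decide (0 ≤ r + dr ∧ r + dr < (h : Int) ∧ 0 ≤ c + dc ∧ c + dc < (w : Int)) &&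
          (pvGet grid (r + dr) (c + dc) != 0)))

def solve_42a50994_alt (grid : List (List Int)) : List (List Int) :=
  let h := grid.length
  let w := (grid.getD 0 []).length   -- len(grid[0]); raises IndexError on [], excluded by Pre_
  (List.range h).map (fun (r : Nat) =>
    (List.range w).map (fun (c : Nat) =>
      if pvGet grid (r : Int) (c : Int) ≠ 0 ∧ pvHasNbr grid h w (r : Int) (c : Int) then
        pvGet grid (r : Int) (c : Int)
      else 0))

-- ===== PRECONDITION & SPEC =====
-- Pre_ excludes exactly the inputs where the Python A raises IndexError: the empty grid
-- (len(grid[0])) and ragged grids with a row shorter than row 0 (grid[r][c] for c < w).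
def Pre_solve_42a50994 (grid : List (List Int)) : Prop :=
  grid ≠ [] ∧ ∀ row ∈ grid, (grid.headD []).length ≤ row.length
instance (grid : List (List Int)) : Decidable (Pre_solve_42a50994 grid) := by
  unfold Pre_solve_42a50994; infer_instance

def pvWitness_solve_42a50994 : List (List Int) := [[1, 1, 0], [0, 0, 2]]

def Spec_solve_42a50994 (grid : List (List Int)) (out : List (List Int)) : Prop :=
  out = solve_42a50994_alt grid
instance (grid : List (List Int)) (out : List (List Int)) :
    Decidable (Spec_solve_42a50994 grid out) := by unfold Spec_solve_42a50994; infer_instance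

-- ===== CLAIM (what is proved, stated in full; the proofs are below) =====
def Claim_equal_solve_42a50994 : Prop :=
  ∀ (grid : List (List Int)), Dom_solve_42a50994 grid → Pre_solve_42a50994 grid →
    Spec_solve_42a50994 grid (solve_42a50994 grid)

-- ===== LEMMAS AND PROOFS =====

-- neighbor cells of x in A's scan order, and "in-bounds nonzero cell"
def pvNbrs (x : Int × Int) : List (Int × Int) :=
  [(x.1 - 1, x.2 - 1), (x.1 - 1, x.2), (x.1 - 1, x.2 + 1), (x.1, x.2 - 1), (x.1, x.2 + 1),
   (x.1 + 1, x.2 - 1), (x.1 + 1, x.2), (x.1 + 1, x.2 + 1)]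

def pvNZ (grid : List (List Int)) (h w : Nat) (x : Int × Int) : Prop :=
  0 ≤ x.1 ∧ x.1 < (h : Int) ∧ 0 ≤ x.2 ∧ x.2 < (w : Int) ∧ pvGet grid x.1 x.2 ≠ 0

def pvCells (h w : Nat) : List (Int × Int) :=
  (List.range h).flatMap (fun r => (List.range w).map (fun c => ((r : Int), (c : Int))))

def pvOStep (grid : List (List Int)) (h w : Nat)
    (st : List (Int × Int) × List (List (Int × Int))) (x : Int × Int) :
    List (Int × Int) × List (List (Int × Int)) :=
  if pvGet grid x.1 x.2 ≠ 0 ∧ ¬ x ∈ st.1 then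
    let res := pvBFS grid h w (h * w) (st.1 ++ [x], [x], [x])
    (res.1, st.2 ++ [res.2])
  else st

lemma pvScan_eq (grid : List (List Int)) (h w : Nat) (cr cc : Int)
    (st : List (Int × Int) × List (Int × Int) × List (Int × Int)) :
    pvScan grid h w cr cc st = (pvNbrs (cr, cc)).foldl (pvCondAdd grid h w) st := by
  obtain ⟨v, comp, q⟩ := st
  norm_num [pvScan, pvNbrs, List.foldl, sub_eq_add_neg]


lemma pvNbrs_symm (x y : Int × Int) : x ∈ pvNbrs y ↔ y ∈ pvNbrs x := by
  obtain ⟨a, b⟩ := x; obtain ⟨d, e⟩ := y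
  simp [pvNbrs, Prod.ext_iff]
  omega


lemma pvNbrs_not_self (x : Int × Int) : ¬ x ∈ pvNbrs x := by
  obtain ⟨a, b⟩ := x
  simp [pvNbrs, Prod.ext_iff]
  omega


lemma pvFoldl_condAdd (grid : List (List Int)) (h w : Nat) :
    ∀ (ds : List (Int × Int)) (v comp q : List (Int × Int)),
      ∃ added, ds.foldl (pvCondAdd grid h w) (v, comp, q) = (v ++ added, comp ++ added, q ++ added) ∧
        added.Nodup ∧ (∀ y ∈ added, y ∈ ds ∧ pvNZ grid h w y ∧ ¬ y ∈ v) ∧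
        (∀ y ∈ ds, pvNZ grid h w y → y ∈ v ++ added) := by
  intro ds
  induction ds with
  | nil => intro v comp q; exact ⟨[], by simp, by simp, by simp, by simp⟩
  | cons y ds ih =>
    intro v comp q
    by_cases hcond : 0 ≤ y.1 ∧ y.1 < (h : Int) ∧ 0 ≤ y.2 ∧ y.2 < (w : Int) ∧ ¬ y ∈ v ∧
        pvGet grid y.1 y.2 ≠ 0
    · have hstep : pvCondAdd grid h w (v, comp, q) y = (v ++ [y], comp ++ [y], q ++ [y]) := by
        simp only [pvCondAdd]; rw [if_pos hcond]
      obtain ⟨added, heq, hnd, hmem, hcov⟩ := ih (v ++ [y]) (comp ++ [y]) (q ++ [y])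
      refine ⟨y :: added, ?_, ?_, ?_, ?_⟩
      · simp only [List.foldl_cons, hstep, heq, List.append_assoc, List.singleton_append]
      · refine List.nodup_cons.mpr ⟨fun hy => ?_, hnd⟩
        exact (hmem y hy).2.2 (by simp)
      · intro z hz
        rcases List.mem_cons.mp hz with rfl | hz
        · exact ⟨by simp, ⟨hcond.1, hcond.2.1, hcond.2.2.1, hcond.2.2.2.1, hcond.2.2.2.2.2⟩,
            hcond.2.2.2.2.1⟩
        · obtain ⟨h1, h2, h3⟩ := hmem z hz
          exact ⟨by simp [h1], h2, fun hzv => h3 (by simp [hzv])⟩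
      · intro z hz hnz
        rcases List.mem_cons.mp hz with rfl | hz
        · simp
        · have := hcov z hz hnz
          simpa [List.append_assoc] using this
    · have hstep : pvCondAdd grid h w (v, comp, q) y = (v, comp, q) := by
        simp only [pvCondAdd]; rw [if_neg hcond]
      obtain ⟨added, heq, hnd, hmem, hcov⟩ := ih v comp q
      refine ⟨added, by simp only [List.foldl_cons, hstep, heq], hnd, ?_, ?_⟩
      · intro z hz
        obtain ⟨h1, h2, h3⟩ := hmem z hz
        exact ⟨by simp [h1], h2, h3⟩
      · intro z hz hnz
        rcases List.mem_cons.mp hz with rfl | hz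
        · have hzv : z ∈ v := by
            by_contra hzv
            exact hcond ⟨hnz.1, hnz.2.1, hnz.2.2.1, hnz.2.2.2.1, hzv, hnz.2.2.2.2⟩
          simp [hzv]
        · exact hcov z hz hnz


lemma pvCard_bound (h w : Nat) (l : List (Int × Int)) (hnd : l.Nodup)
    (hb : ∀ x ∈ l, 0 ≤ x.1 ∧ x.1 < (h : Int) ∧ 0 ≤ x.2 ∧ x.2 < (w : Int)) :
    l.length ≤ h * w := by
  classical
  rcases Nat.eq_zero_or_pos w with hw0 | hw
  · match l, hb with
    | [], _ => simp
    | x :: l, hb =>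
      exfalso
      obtain ⟨_, _, h3, h4⟩ := hb x (by simp)
      rw [hw0] at h4
      simp only [Nat.cast_zero] at h4
      omega
  · have hinj : ∀ x ∈ l, ∀ y ∈ l, x.1.toNat * w + x.2.toNat = y.1.toNat * w + y.2.toNat → x = y := by
      intro x hx y hy hf
      obtain ⟨hx1, hx2, hx3, hx4⟩ := hb x hx
      obtain ⟨hy1, hy2, hy3, hy4⟩ := hb y hy
      have hbx : x.2.toNat < w := by omega
      have hby : y.2.toNat < w := by omega
      have h1 : x.1.toNat = (x.1.toNat * w + x.2.toNat) / w := by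
        rw [Nat.mul_comm, Nat.mul_add_div hw, Nat.div_eq_of_lt hbx, Nat.add_zero]
      have h2 : y.1.toNat = (y.1.toNat * w + y.2.toNat) / w := by
        rw [Nat.mul_comm, Nat.mul_add_div hw, Nat.div_eq_of_lt hby, Nat.add_zero]
      have heq1 : x.1.toNat = y.1.toNat := by rw [h1, h2, hf]
      have heq2 : x.2.toNat = y.2.toNat := by rw [heq1] at hf; omega
      have : x.1 = y.1 := by omega
      have : x.2 = y.2 := by omega
      exact Prod.ext (by omega) (by omega)
    have hnd2 : (l.map (fun x : Int × Int => x.1.toNat * w + x.2.toNat)).Nodup :=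
      hnd.map_on hinj
    have hsub : (l.map (fun x : Int × Int => x.1.toNat * w + x.2.toNat)).toFinset ⊆
        Finset.range (h * w) := by
      intro n hn
      simp only [List.mem_toFinset, List.mem_map] at hn
      obtain ⟨x, hx, rfl⟩ := hn
      obtain ⟨hx1, hx2, hx3, hx4⟩ := hb x hx
      have hA : x.1.toNat < h := by omega
      have hB : x.2.toNat < w := by omega
      have : x.1.toNat * w + x.2.toNat < (x.1.toNat + 1) * w := by
        rw [Nat.add_mul, Nat.one_mul]; omega
      have h2 : (x.1.toNat + 1) * w ≤ h * w := Nat.mul_le_mul_right w hA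
      exact Finset.mem_range.mpr (by omega)
    calc l.length = (l.map (fun x : Int × Int => x.1.toNat * w + x.2.toNat)).length := by simp
      _ = (l.map (fun x : Int × Int => x.1.toNat * w + x.2.toNat)).toFinset.card :=
          (List.toFinset_card_of_nodup hnd2).symm
      _ ≤ (Finset.range (h * w)).card := Finset.card_le_card hsub
      _ = h * w := Finset.card_range _


structure pvBInv (grid : List (List Int)) (h w : Nat) (V0 : List (Int × Int)) (s : Int × Int)
    (st : List (Int × Int) × List (Int × Int) × List (Int × Int)) : Prop where
  hv : st.1 = V0 ++ st.2.1
  hnodup : st.1.Nodup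
  hnz : ∀ x ∈ st.2.1, pvNZ grid h w x
  hseed : s ∈ st.2.1
  hdone : ∃ done, st.2.1 = done ++ st.2.2 ∧
    ∀ x ∈ done, ∀ y ∈ pvNbrs x, pvNZ grid h w y → y ∈ st.1
  hparent : ∀ y ∈ st.2.1, y = s ∨ ∃ x ∈ st.2.1, y ∈ pvNbrs x
  hsingle : st.2.1 ≠ [s] → ∃ z ∈ pvNbrs s, pvNZ grid h w z

lemma pvBInv_extract (grid : List (List Int)) (h w : Nat) (V0 : List (Int × Int))
    (s : Int × Int) (st : List (Int × Int) × List (Int × Int) × List (Int × Int))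
    (hinv : pvBInv grid h w V0 s st) (hq : st.2.2 = []) :
    st.1 = V0 ++ st.2.1 ∧ st.1.Nodup ∧ (∀ x ∈ st.2.1, pvNZ grid h w x) ∧ s ∈ st.2.1 ∧
      (∀ x ∈ st.2.1, ∀ y ∈ pvNbrs x, pvNZ grid h w y → y ∈ st.1) ∧
      (∀ x ∈ st.2.1, st.2.1 = [x] ∨ ∃ z ∈ pvNbrs x, pvNZ grid h w z) := by
  obtain ⟨done, hdq, hdone⟩ := hinv.hdone
  rw [hq, List.append_nil] at hdq
  subst hdq
  refine ⟨hinv.hv, hinv.hnodup, hinv.hnz, hinv.hseed, hdone, ?_⟩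
  intro x hx
  by_cases hxs : x = s
  · subst hxs
    by_cases hC : st.2.1 = [x]
    · exact Or.inl hC
    · exact Or.inr (hinv.hsingle hC)
  · rcases hinv.hparent x hx with rfl | ⟨p, hp, hxp⟩
    · exact absurd rfl hxs
    · exact Or.inr ⟨p, (pvNbrs_symm p x).mpr hxp, hinv.hnz p hp⟩

lemma pvBFS_post (grid : List (List Int)) (h w : Nat) :
    ∀ (fuel : Nat) (V0 : List (Int × Int)) (s : Int × Int)
      (st : List (Int × Int) × List (Int × Int) × List (Int × Int)),
      pvBInv grid h w V0 s st →
      h * w + st.2.2.length ≤ fuel + st.2.1.length →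
      ∃ C, pvBFS grid h w fuel st = (V0 ++ C, C) ∧
        (V0 ++ C).Nodup ∧ (∀ x ∈ C, pvNZ grid h w x) ∧ s ∈ C ∧
        (∀ x ∈ C, ∀ y ∈ pvNbrs x, pvNZ grid h w y → y ∈ V0 ++ C) ∧
        (∀ x ∈ C, C = [x] ∨ ∃ z ∈ pvNbrs x, pvNZ grid h w z) := by
  intro fuel
  induction fuel with
  | zero =>
    intro V0 s st hinv hfuel
    have hndc : st.2.1.Nodup := by
      have hnd := hinv.hnodup
      rw [hinv.hv] at hnd
      exact (List.nodup_append.mp hnd).2.1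
    have hcb : st.2.1.length ≤ h * w := pvCard_bound h w st.2.1 hndc
      (fun x hx => ⟨(hinv.hnz x hx).1, (hinv.hnz x hx).2.1, (hinv.hnz x hx).2.2.1,
        (hinv.hnz x hx).2.2.2.1⟩)
    have hq : st.2.2 = [] := List.eq_nil_of_length_eq_zero (by omega)
    obtain ⟨h1, h2, h3, h4, h5, h6⟩ := pvBInv_extract grid h w V0 s st hinv hq
    refine ⟨st.2.1, ?_, by rw [← h1]; exact h2, h3, h4, by rw [← h1]; exact h5, h6⟩
    show (st.1, st.2.1) = _
    rw [h1]
  | succ fuel ih =>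
    intro V0 s st hinv hfuel
    obtain ⟨v, comp, q⟩ := st
    dsimp only at hfuel
    rcases q with _ | ⟨⟨cr, cc⟩, rest⟩
    ·
      obtain ⟨h1, h2, h3, h4, h5, h6⟩ := pvBInv_extract grid h w V0 s (v, comp, []) hinv rfl
      simp only at h1 h2 h3 h4 h5 h6
      refine ⟨comp, ?_, by rw [← h1]; exact h2, h3, h4, by rw [← h1]; exact h5, h6⟩
      show (v, comp) = _
      rw [h1]
    ·
      obtain ⟨done, hdq, hdone⟩ := hinv.hdone
      simp only at hdq hdone
      have hv : v = V0 ++ comp := hinv.hv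
      have hstep : pvBFS grid h w (fuel + 1) (v, comp, (cr, cc) :: rest) =
          pvBFS grid h w fuel (pvScan grid h w cr cc (v, comp, rest)) := rfl
      obtain ⟨added, heq, hnd, hmem, hcov⟩ :=
        pvFoldl_condAdd grid h w (pvNbrs (cr, cc)) v comp rest
      rw [hstep, pvScan_eq, heq]
      have hdisj : ∀ a ∈ added, ¬ a ∈ v := fun a ha => (hmem a ha).2.2
      have hnodup' : (v ++ added).Nodup := by
        rw [List.nodup_append]
        exact ⟨hinv.hnodup, hnd, fun a hav b hb hab => hdisj b hb (hab ▸ hav)⟩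
      have hcrcc : (cr, cc) ∈ comp := by rw [hdq]; exact List.mem_append_right _ (by simp)
      have hinv' : pvBInv grid h w V0 s (v ++ added, comp ++ added, rest ++ added) := by
        refine ⟨?_, hnodup', ?_, List.mem_append_left _ hinv.hseed, ?_, ?_, ?_⟩
        · show v ++ added = V0 ++ (comp ++ added)
          rw [hv, List.append_assoc]
        · intro x hx
          rcases List.mem_append.mp hx with hx | hx
          · exact hinv.hnz x hx
          · exact (hmem x hx).2.1
        · refine ⟨done ++ [(cr, cc)], ?_, ?_⟩
          · show comp ++ added = (done ++ [(cr, cc)]) ++ (rest ++ added)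
            rw [hdq]
            simp
          · intro x hx
            rcases List.mem_append.mp hx with hx | hx
            · intro y hy hynz
              exact List.mem_append_left _ (hdone x hx y hy hynz)
            · simp only [List.mem_singleton] at hx
              subst hx
              intro y hy hynz
              exact hcov y hy hynz
        · intro y hy
          rcases List.mem_append.mp hy with hy | hy
          · rcases hinv.hparent y hy with rfl | ⟨p, hp, hyp⟩
            · exact Or.inl rfl
            · exact Or.inr ⟨p, List.mem_append_left _ hp, hyp⟩
          · exact Or.inr ⟨(cr, cc), List.mem_append_left _ hcrcc, (hmem y hy).1⟩
        · by_cases hc1 : comp = [s]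
          · intro hne
            have hdq1 : done ++ (cr, cc) :: rest = [s] := by rw [← hdq, hc1]
            have hlen1 := congrArg List.length hdq1
            simp at hlen1
            have hdone0 : done = [] := List.eq_nil_of_length_eq_zero (by omega)
            subst hdone0
            simp only [List.nil_append, List.cons.injEq] at hdq1
            have hadd : added ≠ [] := by
              intro hadd0
              rw [hc1, hadd0, List.append_nil] at hne
              exact hne rfl
            obtain ⟨z, hz⟩ := List.exists_mem_of_ne_nil added hadd
            exact ⟨z, by rw [← hdq1.1]; exact (hmem z hz).1, (hmem z hz).2.1⟩
          · intro _
            exact hinv.hsingle hc1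
      have hfuel' : h * w + (rest ++ added).length ≤ fuel + (comp ++ added).length := by
        simp only [List.length_append]
        simp only [List.length_cons] at hfuel
        omega
      exact ih V0 s (v ++ added, comp ++ added, rest ++ added) hinv' hfuel' 


lemma pvOuter_eq (grid : List (List Int)) (h w : Nat) :
    pvOuter grid h w = (pvCells h w).foldl (pvOStep grid h w) ([], []) := by
  unfold pvOuter pvCells pvOStep
  simp [List.flatMap, List.foldl_flatten, List.foldl_map]


structure pvOInv (grid : List (List Int)) (h w : Nat)
    (st : List (Int × Int) × List (List (Int × Int))) : Prop where
  hflat : st.1 = st.2.flatten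
  hnodup : st.1.Nodup
  hnz : ∀ C ∈ st.2, ∀ x ∈ C, pvNZ grid h w x
  hclosed : ∀ C ∈ st.2, ∀ x ∈ C, ∀ y ∈ pvNbrs x, pvNZ grid h w y → y ∈ C
  hsing : ∀ C ∈ st.2, ∀ x ∈ C, C = [x] ∨ ∃ z ∈ pvNbrs x, pvNZ grid h w z

lemma pvOuter_fold (grid : List (List Int)) (h w : Nat) :
    ∀ (cells : List (Int × Int)),
      (∀ x ∈ cells, 0 ≤ x.1 ∧ x.1 < (h : Int) ∧ 0 ≤ x.2 ∧ x.2 < (w : Int)) →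
      ∀ st, pvOInv grid h w st →
      pvOInv grid h w (cells.foldl (pvOStep grid h w) st) ∧
        (∀ y ∈ st.1, y ∈ (cells.foldl (pvOStep grid h w) st).1) ∧
        (∀ x ∈ cells, pvNZ grid h w x → x ∈ (cells.foldl (pvOStep grid h w) st).1) := by
  intro cells
  induction cells with
  | nil => exact fun _ st hst => ⟨hst, fun y hy => hy, by simp⟩
  | cons x cells ih =>
    intro hb st hst
    rw [List.foldl_cons]
    by_cases hcond : pvGet grid x.1 x.2 ≠ 0 ∧ ¬ x ∈ st.1
    · have hxb := hb x (by simp)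
      have hxnz : pvNZ grid h w x := ⟨hxb.1, hxb.2.1, hxb.2.2.1, hxb.2.2.2, hcond.1⟩
      have hinv : pvBInv grid h w st.1 x (st.1 ++ [x], [x], [x]) := by
        refine ⟨rfl, ?_, ?_, by simp, ⟨[], by simp, by simp⟩, ?_, fun hne => absurd rfl hne⟩
        · rw [List.nodup_append]
          exact ⟨hst.hnodup, List.nodup_singleton x,
            fun a hav b hbx hab => hcond.2 (by
              simp only [List.mem_singleton] at hbx
              subst hbx
              subst hab
              exact hav)⟩
        · intro y hy
          simp only [List.mem_singleton] at hy
          subst hy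
          exact hxnz
        · intro y hy
          simp only [List.mem_singleton] at hy
          exact Or.inl hy
      obtain ⟨C, heqC, hndC, hnzC, hseedC, hcloC, hsingC⟩ :=
        pvBFS_post grid h w (h * w) st.1 x (st.1 ++ [x], [x], [x]) hinv (by simp)
      have hstep : pvOStep grid h w st x = (st.1 ++ C, st.2 ++ [C]) := by
        simp only [pvOStep]
        rw [if_pos hcond, heqC]
      rw [hstep]
      have hOI : pvOInv grid h w (st.1 ++ C, st.2 ++ [C]) := by
        refine ⟨?_, hndC, ?_, ?_, ?_⟩
        · show st.1 ++ C = (st.2 ++ [C]).flatten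
          rw [hst.hflat, List.flatten_append]
          simp
        · intro C' hC' y hy
          rcases List.mem_append.mp hC' with hC' | hC'
          · exact hst.hnz C' hC' y hy
          · simp only [List.mem_singleton] at hC'
            subst hC'
            exact hnzC y hy
        · intro C' hC' a ha y hy hynz
          rcases List.mem_append.mp hC' with hC' | hC'
          · exact hst.hclosed C' hC' a ha y hy hynz
          · simp only [List.mem_singleton] at hC'
            subst hC'
            rcases List.mem_append.mp (hcloC a ha y hy hynz) with hyV | hyC
            · exfalso
              obtain ⟨C'', hC'', hyC''⟩ := List.mem_flatten.mp (hst.hflat ▸ hyV)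
              have haC'' : a ∈ C'' :=
                hst.hclosed C'' hC'' y hyC'' a ((pvNbrs_symm a y).mpr hy) (hnzC a ha)
              have haV : a ∈ st.1 := hst.hflat ▸ List.mem_flatten.mpr ⟨C'', hC'', haC''⟩
              have hdisj := (List.nodup_append.mp hndC).2.2
              exact hdisj a haV a ha rfl
            · exact hyC
        · intro C' hC' a ha
          rcases List.mem_append.mp hC' with hC' | hC'
          · exact hst.hsing C' hC' a ha
          · simp only [List.mem_singleton] at hC'
            subst hC'
            exact hsingC a ha
      obtain ⟨hI, hmono, hcov⟩ := ih (fun y hy => hb y (by simp [hy])) (st.1 ++ C, st.2 ++ [C]) hOI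
      refine ⟨hI, ?_, ?_⟩
      · intro y hy
        exact hmono y (List.mem_append_left _ hy)
      · intro z hz hznz
        rcases List.mem_cons.mp hz with rfl | hz
        · exact hmono z (List.mem_append_right _ hseedC)
        · exact hcov z hz hznz
    · have hstep : pvOStep grid h w st x = st := by
        simp only [pvOStep]
        rw [if_neg hcond]
      rw [hstep]
      obtain ⟨hI, hmono, hcov⟩ := ih (fun y hy => hb y (by simp [hy])) st hst
      refine ⟨hI, hmono, ?_⟩
      intro z hz hznz
      rcases List.mem_cons.mp hz with rfl | hz
      · have hzV : z ∈ st.1 := by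
          by_contra hzV
          exact hcond ⟨hznz.2.2.2.2, hzV⟩
        exact hmono z hzV
      · exact hcov z hz hznz


lemma pvMem_cells (h w : Nat) (x : Int × Int)
    (hb : 0 ≤ x.1 ∧ x.1 < (h : Int) ∧ 0 ≤ x.2 ∧ x.2 < (w : Int)) : x ∈ pvCells h w := by
  obtain ⟨a, b⟩ := x
  simp only at hb
  simp only [pvCells, List.pure_def, List.bind_eq_flatMap, List.mem_flatMap, List.mem_range,
    List.mem_cons, List.not_mem_nil, or_false, List.mem_map, Prod.mk.injEq,
    exists_eq_right_right]
  exact ⟨⟨a.toNat, by omega, by omega⟩, ⟨b.toNat, by omega, by omega⟩⟩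


lemma pvTwo_le_length {α : Type} (C : List α) (x z : α) (hx : x ∈ C) (hz : z ∈ C)
    (hne : x ≠ z) : 2 ≤ C.length := by
  match C with
  | [] => simp at hx
  | [a] => simp at hx hz; subst hx; subst hz; exact absurd rfl hne
  | a :: b :: C => simp only [List.length_cons]; omega


lemma pvOuter_spec (grid : List (List Int)) (h w : Nat) :
    pvOInv grid h w (pvOuter grid h w) ∧
      ∀ x, pvNZ grid h w x → x ∈ (pvOuter grid h w).1 := by
  have hb : ∀ x ∈ pvCells h w, 0 ≤ x.1 ∧ x.1 < (h : Int) ∧ 0 ≤ x.2 ∧ x.2 < (w : Int) := by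
    intro x hx
    simp only [pvCells, List.pure_def, List.bind_eq_flatMap, List.mem_flatMap, List.mem_range,
      List.mem_cons, List.not_mem_nil, or_false, List.mem_map] at hx
    obtain ⟨r, hr, c, hc, rfl⟩ := hx
    simp only
    omega
  have h0 : pvOInv grid h w ([], []) := ⟨by simp, by simp, by simp, by simp, by simp⟩
  obtain ⟨hI, _, hcov⟩ := pvOuter_fold grid h w (pvCells h w) hb ([], []) h0
  rw [pvOuter_eq]
  refine ⟨hI, ?_⟩
  intro x hxnz
  exact hcov x (pvMem_cells h w x ⟨hxnz.1, hxnz.2.1, hxnz.2.2.1, hxnz.2.2.2.1⟩) hxnz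

-- the heart of the equivalence: a cell lies in a component of size ≥ 2
-- iff it is nonzero with a nonzero 8-neighbor
lemma pvComps_char (grid : List (List Int)) (h w : Nat) (x : Int × Int) :
    (∃ C ∈ (pvOuter grid h w).2, x ∈ C ∧ 2 ≤ C.length) ↔
      (pvNZ grid h w x ∧ ∃ z ∈ pvNbrs x, pvNZ grid h w z) := by
  obtain ⟨hOI, hcov⟩ := pvOuter_spec grid h w
  constructor
  · rintro ⟨C, hC, hxC, hlen⟩
    refine ⟨hOI.hnz C hC x hxC, ?_⟩
    rcases hOI.hsing C hC x hxC with hCx | hz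
    · rw [hCx] at hlen
      simp at hlen
    · exact hz
  · rintro ⟨hxnz, z, hz, hznz⟩
    have hxV := hcov x hxnz
    rw [hOI.hflat] at hxV
    obtain ⟨C, hC, hxC⟩ := List.mem_flatten.mp hxV
    have hzC : z ∈ C := hOI.hclosed C hC x hxC z hz hznz
    have hne : x ≠ z := fun he => pvNbrs_not_self x (he ▸ hz)
    exact ⟨C, hC, hxC, pvTwo_le_length C x z hxC hzC hne⟩


def pvShape (h w : Nat) (out : List (List Int)) : Prop :=
  out.length = h ∧ ∀ row ∈ out, row.length = w

def pvGet2 (out : List (List Int)) (r c : Nat) : Int := (out.getD r []).getD c 0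

lemma pvSet2_shape (h w : Nat) (out : List (List Int)) (hsh : pvShape h w out) (a b v : Int)
    (ha : 0 ≤ a ∧ a < (h : Int)) : pvShape h w (pvSet2 out a b v) := by
  obtain ⟨hlen, hrow⟩ := hsh
  have hA : a.toNat < out.length := by omega
  refine ⟨by simp [pvSet2, hlen], ?_⟩
  intro row hm
  rcases List.mem_or_eq_of_mem_set hm with hmem | rfl
  · exact hrow row hmem
  · have hrl : (out.getD a.toNat []).length = w := by
      rw [List.getD_eq_getElem out [] hA]; exact hrow _ (List.getElem_mem hA)
    simp only [List.length_set]; exact hrl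

lemma pvSet2_get (h w : Nat) (out : List (List Int)) (hsh : pvShape h w out) (x : Int × Int)
    (hx : 0 ≤ x.1 ∧ x.1 < (h : Int) ∧ 0 ≤ x.2 ∧ x.2 < (w : Int)) (v : Int) (r c : Nat)
    (hr : r < h) (hc : c < w) :
    pvGet2 (pvSet2 out x.1 x.2 v) r c = if x = ((r : Int), (c : Int)) then v else pvGet2 out r c := by
  obtain ⟨hlen, hrow⟩ := hsh
  obtain ⟨a, b⟩ := x
  simp only at hx
  have hiff : (((a, b) : Int × Int) = ((r : Int), (c : Int))) ↔ (a.toNat = r ∧ b.toNat = c) := by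
    simp only [Prod.mk.injEq]; omega
  have hA : a.toNat < out.length := by omega
  have hrl : (out.getD a.toNat []).length = w := by
    rw [List.getD_eq_getElem out [] hA]; exact hrow _ (List.getElem_mem hA)
  simp only [pvGet2, pvSet2]
  by_cases hr2 : a.toNat = r
  · subst hr2
    rw [List.getD_eq_getElem (out.set a.toNat ((out.getD a.toNat []).set b.toNat v)) []
      (by simp only [List.length_set]; omega)]
    rw [List.getElem_set_self (by simp only [List.length_set]; omega)]
    by_cases hc2 : b.toNat = c
    · subst hc2
      rw [List.getD_eq_getElem ((out.getD a.toNat []).set b.toNat v) 0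
        (by simp only [List.length_set]; omega)]
      rw [List.getElem_set_self (by simp only [List.length_set]; omega)]
      rw [if_pos (hiff.mpr ⟨rfl, rfl⟩)]
    · rw [List.getD_eq_getElem ((out.getD a.toNat []).set b.toNat v) 0
        (by simp only [List.length_set]; omega)]
      rw [List.getElem_set_ne hc2]
      rw [if_neg (fun hcontra => hc2 (hiff.mp hcontra).2)]
      rw [List.getD_eq_getElem (out.getD a.toNat []) 0 (by omega)]
  · rw [List.getD_eq_getElem (out.set a.toNat ((out.getD a.toNat []).set b.toNat v)) []
      (by simp only [List.length_set]; omega)]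
    rw [List.getElem_set_ne hr2]
    rw [if_neg (fun hcontra => hr2 (hiff.mp hcontra).1)]
    rw [List.getD_eq_getElem out [] (show r < out.length by omega)]

lemma pvSet_fold (grid : List (List Int)) (h w : Nat) :
    ∀ (cells : List (Int × Int)) (out : List (List Int)), pvShape h w out →
      (∀ x ∈ cells, pvNZ grid h w x) →
      pvShape h w (cells.foldl (fun o rc => pvSet2 o rc.1 rc.2 (pvGet grid rc.1 rc.2)) out) ∧
      ∀ (r c : Nat), r < h → c < w →
        pvGet2 (cells.foldl (fun o rc => pvSet2 o rc.1 rc.2 (pvGet grid rc.1 rc.2)) out) r c =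
          if ((r : Int), (c : Int)) ∈ cells then pvGet grid (r : Int) (c : Int) else pvGet2 out r c := by
  intro cells
  induction cells with
  | nil => intro out hsh _; exact ⟨hsh, by simp⟩
  | cons x cells ih =>
    intro out hsh hnz
    have hxnz := hnz x (by simp)
    have hsh' := pvSet2_shape h w out hsh x.1 x.2 (pvGet grid x.1 x.2) ⟨hxnz.1, hxnz.2.1⟩
    obtain ⟨hsh2, hget⟩ := ih (pvSet2 out x.1 x.2 (pvGet grid x.1 x.2)) hsh'
      (fun y hy => hnz y (by simp [hy]))
    refine ⟨by simpa using hsh2, ?_⟩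
    intro r c hr hc
    rw [List.foldl_cons, hget r c hr hc,
      pvSet2_get h w out hsh x ⟨hxnz.1, hxnz.2.1, hxnz.2.2.1, hxnz.2.2.2.1⟩
        (pvGet grid x.1 x.2) r c hr hc]
    by_cases hmem : ((r : Int), (c : Int)) ∈ cells
    · simp [hmem]
    · by_cases hxx : x = ((r : Int), (c : Int))
      · rw [if_neg hmem, if_pos hxx, if_pos (by simp [List.mem_cons, hxx.symm])]
        rw [hxx]
      · rw [if_neg hmem, if_neg hxx,
          if_neg (by simp [List.mem_cons]; exact ⟨fun he => hxx he.symm, hmem⟩)]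


lemma pvMark_fold (grid : List (List Int)) (h w : Nat) :
    ∀ (CS : List (List (Int × Int))) (out : List (List Int)), pvShape h w out →
      (∀ C ∈ CS, ∀ x ∈ C, pvNZ grid h w x) →
      pvShape h w (CS.foldl (fun out comp =>
          if 2 ≤ comp.length then
            comp.foldl (fun out rc => pvSet2 out rc.1 rc.2 (pvGet grid rc.1 rc.2)) out
          else out) out) ∧
      ∀ (r c : Nat), r < h → c < w →
        pvGet2 (CS.foldl (fun out comp =>
          if 2 ≤ comp.length then
            comp.foldl (fun out rc => pvSet2 out rc.1 rc.2 (pvGet grid rc.1 rc.2)) out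
          else out) out) r c =
          if ∃ C ∈ CS, ((r : Int), (c : Int)) ∈ C ∧ 2 ≤ C.length then pvGet grid (r : Int) (c : Int)
          else pvGet2 out r c := by
  intro CS
  induction CS with
  | nil => intro out hsh _; exact ⟨hsh, by simp⟩
  | cons C CS ih =>
    intro out hsh hnz
    by_cases hlen : 2 ≤ C.length
    · obtain ⟨hshC, hgetC⟩ := pvSet_fold grid h w C out hsh (hnz C (by simp))
      obtain ⟨hsh2, hget2⟩ := ih _ hshC (fun C' hC' => hnz C' (by simp [hC']))
      refine ⟨by simpa [hlen] using hsh2, ?_⟩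
      intro r c hr hc
      rw [List.foldl_cons]
      rw [if_pos hlen]
      rw [hget2 r c hr hc, hgetC r c hr hc]
      by_cases hCS : ∃ C' ∈ CS, ((r : Int), (c : Int)) ∈ C' ∧ 2 ≤ C'.length
      · rw [if_pos hCS, if_pos ?_]
        obtain ⟨C', hC', hm, hl⟩ := hCS
        exact ⟨C', by simp [hC'], hm, hl⟩
      · rw [if_neg hCS]
        by_cases hmem : ((r : Int), (c : Int)) ∈ C
        · rw [if_pos hmem, if_pos ⟨C, by simp, hmem, hlen⟩]
        · rw [if_neg hmem, if_neg ?_]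
          rintro ⟨C', hC', hm, hl⟩
          rcases List.mem_cons.mp hC' with rfl | hC'
          · exact hmem hm
          · exact hCS ⟨C', hC', hm, hl⟩
    · obtain ⟨hsh2, hget2⟩ := ih out hsh (fun C' hC' => hnz C' (by simp [hC']))
      refine ⟨by simpa [hlen] using hsh2, ?_⟩
      intro r c hr hc
      rw [List.foldl_cons]
      rw [if_neg hlen]
      rw [hget2 r c hr hc]
      by_cases hCS : ∃ C' ∈ CS, ((r : Int), (c : Int)) ∈ C' ∧ 2 ≤ C'.length
      · rw [if_pos hCS, if_pos ?_]
        obtain ⟨C', hC', hm, hl⟩ := hCS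
        exact ⟨C', by simp [hC'], hm, hl⟩
      · rw [if_neg hCS, if_neg ?_]
        rintro ⟨C', hC', hm, hl⟩
        rcases List.mem_cons.mp hC' with rfl | hC'
        · exact hlen hl
        · exact hCS ⟨C', hC', hm, hl⟩


lemma pvHasNbr_iff (grid : List (List Int)) (h w : Nat) (r c : Int) :
    pvHasNbr grid h w r c = true ↔ ∃ z ∈ pvNbrs (r, c), pvNZ grid h w z := by
  have h1 : pvHasNbr grid h w r c = (pvNbrs (r, c)).any (fun z =>
      decide (0 ≤ z.1 ∧ z.1 < (h : Int) ∧ 0 ≤ z.2 ∧ z.2 < (w : Int)) &&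
        (pvGet grid z.1 z.2 != 0)) := by
    norm_num [pvHasNbr, pvNbrs, List.any, sub_eq_add_neg]
    simp only [Bool.or_assoc]
  rw [h1, List.any_eq_true]
  refine exists_congr fun z => and_congr_right fun _ => ?_
  simp only [Bool.and_eq_true, decide_eq_true_eq, bne_iff_ne, ne_eq, pvNZ, and_assoc]




-- ===== VERDICT (by name: the statement is the Claim_ definition above) =====
theorem solve_42a50994_spec : Claim_equal_solve_42a50994 := by
  unfold Claim_equal_solve_42a50994
  intro grid _ _
  unfold Spec_solve_42a50994 solve_42a50994 solve_42a50994_alt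
  show (((pvOuter grid grid.length (grid.getD 0 []).length).2).foldl (fun out comp =>
      if 2 ≤ comp.length then
        comp.foldl (fun out rc => pvSet2 out rc.1 rc.2 (pvGet grid rc.1 rc.2)) out
      else out) (List.replicate grid.length (List.replicate (grid.getD 0 []).length 0))) =
    (List.range grid.length).map (fun (r : Nat) =>
      (List.range (grid.getD 0 []).length).map (fun (c : Nat) =>
        if pvGet grid (r : Int) (c : Int) ≠ 0 ∧
            pvHasNbr grid grid.length (grid.getD 0 []).length (r : Int) (c : Int) then
          pvGet grid (r : Int) (c : Int)
        else 0))
  obtain ⟨hOI, hcov⟩ := pvOuter_spec grid grid.length (grid.getD 0 []).length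
  have hsh0 : pvShape grid.length (grid.getD 0 []).length
      (List.replicate grid.length (List.replicate (grid.getD 0 []).length 0)) :=
    ⟨by simp, fun row hrow => by rw [List.eq_of_mem_replicate hrow]; simp⟩
  obtain ⟨hsh, hget⟩ := pvMark_fold grid grid.length (grid.getD 0 []).length
    (pvOuter grid grid.length (grid.getD 0 []).length).2 _ hsh0 hOI.hnz
  apply List.ext_getElem
  · simp only [List.length_map, List.length_range, hsh.1]
  · intro r hr1 hr2
    have hrn : r < grid.length := by
      have := hsh.1
      omega
    apply List.ext_getElem
    · simp only [List.getElem_map, List.getElem_range, List.length_map, List.length_range]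
      exact hsh.2 _ (List.getElem_mem hr1)
    · intro c hc1 hc2
      have hcn : c < (grid.getD 0 []).length := by
        have := hsh.2 _ (List.getElem_mem hr1)
        omega
      simp only [List.getElem_map, List.getElem_range]
      have hbase : pvGet2 (List.replicate grid.length
          (List.replicate (grid.getD 0 []).length 0)) r c = 0 := by
        rw [pvGet2, List.getD_eq_getElem _ [] (by simpa using hrn), List.getElem_replicate,
          List.getD_eq_getElem _ 0 (by simpa using hcn), List.getElem_replicate]
      have hcond : (∃ C ∈ (pvOuter grid grid.length (grid.getD 0 []).length).2,
          ((r : Int), (c : Int)) ∈ C ∧ 2 ≤ C.length) ↔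
          (pvGet grid (r : Int) (c : Int) ≠ 0 ∧
            pvHasNbr grid grid.length (grid.getD 0 []).length (r : Int) (c : Int) = true) := by
        rw [pvComps_char]
        constructor
        · rintro ⟨hnz, hex⟩
          exact ⟨hnz.2.2.2.2, (pvHasNbr_iff grid _ _ _ _).mpr hex⟩
        · rintro ⟨hne, hb⟩
          exact ⟨⟨by simp, by simp only []; exact_mod_cast hrn, by simp,
              by simp only []; exact_mod_cast hcn, hne⟩,
            (pvHasNbr_iff grid _ _ _ _).mp hb⟩
      have hgetrc := hget r c hrn hcn
      rw [pvGet2] at hgetrc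
      rw [List.getD_eq_getElem _ [] hr1] at hgetrc
      rw [List.getD_eq_getElem _ 0 hc1] at hgetrc
      rw [hgetrc, if_congr hcond rfl hbase]
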